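-- pv_equiv track=rewrite | github.com/SoulXHades/Challenges | NTU/CZ1003 Intro To Computational Thinking/Tutorial/DifferenceInMaxMin.py | GetNumDiff
-- ===== SOURCE A (Python) =====
-- def GetNumDiff(ListOfNums):
-- 	MinNum = ListOfNums[0]
-- 	MaxNum = ListOfNums[0]
--
-- 	for i in range(1,3):
-- 		if(MinNum > ListOfNums[i]):
-- 			MinNum = ListOfNums[i]
-- 		if(MaxNum < ListOfNums[i]):
-- 			MaxNum = ListOfNums[i]
--
-- 	return abs(MaxNum-MinNum)
-- ===== SOURCE B (Python) =====
-- def GetNumDiff(ListOfNums):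
--     a, b, c = ListOfNums[0], ListOfNums[1], ListOfNums[2]
--     # diameter = largest pairwise distance; equals max-min for three numbers
--     return max(abs(a - b), abs(a - c), abs(b - c))
-- ===== Notes on version B (the rewrite author's own statement) =====
-- stated objective: alternative
-- what changed: Instead of tracking running min and max and subtracting, B computes the answer as the largest pairwise absolute difference (diameter) of the three elements, max(|a-b|,|a-c|,|b-c|), never computing a min or a max of the values themselves.
import Mathlib
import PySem

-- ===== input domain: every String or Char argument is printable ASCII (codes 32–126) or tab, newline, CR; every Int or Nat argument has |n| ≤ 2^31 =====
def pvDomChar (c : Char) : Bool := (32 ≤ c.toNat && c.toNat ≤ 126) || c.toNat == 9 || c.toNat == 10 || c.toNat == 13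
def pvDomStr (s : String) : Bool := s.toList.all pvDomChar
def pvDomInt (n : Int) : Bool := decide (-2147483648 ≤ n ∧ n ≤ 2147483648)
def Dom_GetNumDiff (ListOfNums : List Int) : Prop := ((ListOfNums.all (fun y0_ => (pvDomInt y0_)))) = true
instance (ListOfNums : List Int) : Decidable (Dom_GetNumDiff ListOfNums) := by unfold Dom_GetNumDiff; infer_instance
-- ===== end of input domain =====

-- B computes the result as the largest pairwise absolute difference (diameter) of the three
-- elements instead of tracking a running min/max and subtracting; objective: alternative.

-- ===== PORT A =====
-- A raises IndexError when the list has fewer than 3 elements (Pre_ excludes those);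
-- the `none` branches below are unreachable under Pre_.
def GetNumDiff (ListOfNums : List Int) : Int :=
  match PySem.List.pyGet? ListOfNums 0 with
  | none => 0
  | some x0 =>
    let st := (PySem.List.pyRange 1 3 1).foldl
      (fun (p : Int × Int) i =>
        match PySem.List.pyGet? ListOfNums i with
        | none => p
        | some v => (if p.1 > v then v else p.1, if p.2 < v then v else p.2))
      (x0, x0)
    |st.2 - st.1|

-- ===== PORT B =====
def GetNumDiff_alt (ListOfNums : List Int) : Int :=
  match PySem.List.pyGet? ListOfNums 0, PySem.List.pyGet? ListOfNums 1, PySem.List.pyGet? ListOfNums 2 with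
  | some a, some b, some c => max |a - b| (max |a - c| |b - c|)
  | _, _, _ => 0

-- ===== PRECONDITION & SPEC =====
-- Pre_ excludes lists with fewer than 3 elements, on which the Python A raises IndexError.
def Pre_GetNumDiff (ListOfNums : List Int) : Prop := 3 ≤ ListOfNums.length
instance (ListOfNums : List Int) : Decidable (Pre_GetNumDiff ListOfNums) := by unfold Pre_GetNumDiff; infer_instance
def pvWitness_GetNumDiff : List Int := [4, -1, 7]

def Spec_GetNumDiff (ListOfNums : List Int) (out : Int) : Prop := out = GetNumDiff_alt ListOfNums
instance (ListOfNums : List Int) (out : Int) : Decidable (Spec_GetNumDiff ListOfNums out) := by unfold Spec_GetNumDiff; infer_instance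

-- ===== CLAIM (what is proved, stated in full; the proofs are below) =====
def Claim_equal_GetNumDiff : Prop := ∀ (ListOfNums : List Int), Dom_GetNumDiff ListOfNums → Pre_GetNumDiff ListOfNums → Spec_GetNumDiff ListOfNums (GetNumDiff ListOfNums)

-- ===== LEMMAS AND PROOFS =====

-- ===== VERDICT (by name: the statement is the Claim_ definition above) =====
theorem GetNumDiff_spec : Claim_equal_GetNumDiff := by
  intro xs _ hpre
  match xs, hpre with
  | a :: b :: c :: rest, _ =>
    show GetNumDiff (a :: b :: c :: rest) = GetNumDiff_alt (a :: b :: c :: rest)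
    have hr : PySem.List.pyRange 1 3 1 = [1, 2] := by decide
    have h0 : PySem.List.pyGet? (a :: b :: c :: rest) 0 = some a := by
      have e : (0:Int) = ((0:Nat):Int) := rfl
      rw [e, PySem.List.pyGet?_natCast]; simp
    have h1 : PySem.List.pyGet? (a :: b :: c :: rest) 1 = some b := by
      have e : (1:Int) = ((1:Nat):Int) := rfl
      rw [e, PySem.List.pyGet?_natCast]; simp
    have h2 : PySem.List.pyGet? (a :: b :: c :: rest) 2 = some c := by
      have e : (2:Int) = ((2:Nat):Int) := rfl
      rw [e, PySem.List.pyGet?_natCast]; simp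
    simp only [GetNumDiff, GetNumDiff_alt, hr, h0, h1, h2, List.foldl]
    simp only [max_def, Int.abs_eq_natAbs]
    split_ifs <;> omega
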